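-- pv_equiv track=rewrite | github.com/Packdan765/Thesis | src/utils/dialogue_planner.py | _analyze_visitor_utterance
-- ===== SOURCE A (Python) =====
-- def _analyze_visitor_utterance(utterance: str) -> str:
--     """Analyze visitor's utterance to understand their intent and interests"""
--     utterance_lower = utterance.lower()
--
--     # Question detection
--     if any(word in utterance_lower for word in ['what', 'how', 'why', 'when', 'where', 'who', 'which']) or '?' in utterance:
--         if any(word in utterance_lower for word in ['more', 'tell me', 'explain', 'about']):
--             return "Asking for more detailed information - wants deeper explanation"
--         elif any(word in utterance_lower for word in ['meaning', 'significance', 'important']):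
--             return "Asking about meaning/significance - wants cultural/historical context"
--         elif any(word in utterance_lower for word in ['made', 'created', 'built', 'constructed']):
--             return "Asking about creation/construction - wants process/technique information"
--         else:
--             return "Asking a specific question - wants direct answer"
--
--     # Interest/engagement detection
--     elif any(word in utterance_lower for word in ['interesting', 'fascinating', 'amazing', 'beautiful', 'incredible']):
--         return "Expressing positive interest - engaged and wants to learn more"
--
--     # Confusion/clarification detection
--     elif any(word in utterance_lower for word in ['confused', 'understand', 'unclear', 'not sure']):
--         return "Expressing confusion - needs clarification or simpler explanation"
--
--     # Agreement/acknowledgment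
--     elif any(word in utterance_lower for word in ['yes', 'ok', 'sure', 'i see', 'understand']):
--         return "Acknowledging information - ready for next topic or deeper detail"
--
--     # Personal connection
--     elif any(word in utterance_lower for word in ['reminds me', 'similar', 'like', 'seen']):
--         return "Making personal connections - engage with their experience"
--
--     else:
--         return "General engagement - continue educational dialogue"
-- ===== SOURCE B (Python) =====
-- _QWORDS = ('what', 'how', 'why', 'when', 'where', 'who', 'which')
--
-- _Q_KEYWORDS = [('more', 0), ('tell me', 0), ('explain', 0), ('about', 0),
--                ('meaning', 1), ('significance', 1), ('important', 1),
--                ('made', 2), ('created', 2), ('built', 2), ('constructed', 2)]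
-- _Q_LABELS = ["Asking for more detailed information - wants deeper explanation",
--              "Asking about meaning/significance - wants cultural/historical context",
--              "Asking about creation/construction - wants process/technique information",
--              "Asking a specific question - wants direct answer"]
--
-- _S_KEYWORDS = [('interesting', 0), ('fascinating', 0), ('amazing', 0), ('beautiful', 0), ('incredible', 0),
--                ('confused', 1), ('understand', 1), ('unclear', 1), ('not sure', 1),
--                ('yes', 2), ('ok', 2), ('sure', 2), ('i see', 2), ('understand', 2),
--                ('reminds me', 3), ('similar', 3), ('like', 3), ('seen', 3)]
-- _S_LABELS = ["Expressing positive interest - engaged and wants to learn more",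
--              "Expressing confusion - needs clarification or simpler explanation",
--              "Acknowledging information - ready for next topic or deeper detail",
--              "Making personal connections - engage with their experience",
--              "General engagement - continue educational dialogue"]
--
--
-- def _analyze_visitor_utterance(utterance: str) -> str:
--     """Analyze visitor's utterance to understand their intent and interests"""
--     utterance_lower = utterance.lower()
--     if '?' in utterance or any(w in utterance_lower for w in _QWORDS):
--         table, labels = _Q_KEYWORDS, _Q_LABELS
--     else:
--         table, labels = _S_KEYWORDS, _S_LABELS
--     best = min((i for w, i in table if w in utterance_lower), default=len(labels) - 1)
--     return labels[best]
-- ===== Notes on version B (the rewrite author's own statement) =====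
-- stated objective: alternative
-- what changed: Instead of an if/elif cascade of grouped any() tests, B flattens the keywords into one (keyword, category-index) table, computes the minimum matching category index in a single pass (min with a default), and indexes into a label array.
import Mathlib
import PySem

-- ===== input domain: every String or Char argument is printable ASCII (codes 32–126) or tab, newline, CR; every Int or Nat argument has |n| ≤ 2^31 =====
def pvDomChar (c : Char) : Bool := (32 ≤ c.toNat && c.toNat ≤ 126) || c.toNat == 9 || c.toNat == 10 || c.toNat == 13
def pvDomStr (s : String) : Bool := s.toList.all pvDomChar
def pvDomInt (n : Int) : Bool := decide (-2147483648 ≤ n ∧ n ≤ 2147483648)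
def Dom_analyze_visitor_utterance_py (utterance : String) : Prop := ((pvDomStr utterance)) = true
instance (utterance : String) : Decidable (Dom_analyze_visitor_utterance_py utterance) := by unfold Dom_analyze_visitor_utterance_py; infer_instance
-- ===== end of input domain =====

-- B replaces the if/elif cascade by a flat (keyword, category) table, a single min-index pass and a label-array lookup (alternative decomposition, same cost).

-- ===== PORT A =====
-- Port of A: the literal if/elif cascade over 'any(word in utterance_lower ...)' tests.
def analyze_visitor_utterance_py (utterance : String) : String :=
  let utterance_lower := PySem.Str.lower utterance
  if (["what", "how", "why", "when", "where", "who", "which"].any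
        (fun word => PySem.Str.isIn word utterance_lower)) || PySem.Str.isIn "?" utterance then
    if ["more", "tell me", "explain", "about"].any (fun word => PySem.Str.isIn word utterance_lower) then
      "Asking for more detailed information - wants deeper explanation"
    else if ["meaning", "significance", "important"].any (fun word => PySem.Str.isIn word utterance_lower) then
      "Asking about meaning/significance - wants cultural/historical context"
    else if ["made", "created", "built", "constructed"].any (fun word => PySem.Str.isIn word utterance_lower) then
      "Asking about creation/construction - wants process/technique information"
    else
      "Asking a specific question - wants direct answer"
  else if ["interesting", "fascinating", "amazing", "beautiful", "incredible"].any
        (fun word => PySem.Str.isIn word utterance_lower) then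
    "Expressing positive interest - engaged and wants to learn more"
  else if ["confused", "understand", "unclear", "not sure"].any
        (fun word => PySem.Str.isIn word utterance_lower) then
    "Expressing confusion - needs clarification or simpler explanation"
  else if ["yes", "ok", "sure", "i see", "understand"].any
        (fun word => PySem.Str.isIn word utterance_lower) then
    "Acknowledging information - ready for next topic or deeper detail"
  else if ["reminds me", "similar", "like", "seen"].any
        (fun word => PySem.Str.isIn word utterance_lower) then
    "Making personal connections - engage with their experience"
  else
    "General engagement - continue educational dialogue"

-- ===== PORT B =====
-- Source B's module-level tables.
def pvQKeywords : List (String × Nat) :=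
  [("more", 0), ("tell me", 0), ("explain", 0), ("about", 0),
   ("meaning", 1), ("significance", 1), ("important", 1),
   ("made", 2), ("created", 2), ("built", 2), ("constructed", 2)]
def pvQLabels : List String :=
  ["Asking for more detailed information - wants deeper explanation",
   "Asking about meaning/significance - wants cultural/historical context",
   "Asking about creation/construction - wants process/technique information",
   "Asking a specific question - wants direct answer"]
def pvSKeywords : List (String × Nat) :=
  [("interesting", 0), ("fascinating", 0), ("amazing", 0), ("beautiful", 0), ("incredible", 0),
   ("confused", 1), ("understand", 1), ("unclear", 1), ("not sure", 1),
   ("yes", 2), ("ok", 2), ("sure", 2), ("i see", 2), ("understand", 2),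
   ("reminds me", 3), ("similar", 3), ("like", 3), ("seen", 3)]
def pvSLabels : List String :=
  ["Expressing positive interest - engaged and wants to learn more",
   "Expressing confusion - needs clarification or simpler explanation",
   "Acknowledging information - ready for next topic or deeper detail",
   "Making personal connections - engage with their experience",
   "General engagement - continue educational dialogue"]

-- min((i for w, i in table if w in ul), default=d): a fold taking min over matching entries,
-- starting from the default (exact here since every table index is below its default).
def pvMinMatch (ul : String) (table : List (String × Nat)) (d : Nat) : Nat :=
  table.foldl (fun acc p => if PySem.Str.isIn p.1 ul then min acc p.2 else acc) d

def analyze_visitor_utterance_py_alt (utterance : String) : String :=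
  let utterance_lower := PySem.Str.lower utterance
  let (table, labels) :=
    if PySem.Str.isIn "?" utterance
        || ["what", "how", "why", "when", "where", "who", "which"].any
             (fun w => PySem.Str.isIn w utterance_lower) then
      (pvQKeywords, pvQLabels)
    else
      (pvSKeywords, pvSLabels)
  let best := pvMinMatch utterance_lower table (labels.length - 1)
  labels.getD best ""

-- ===== PRECONDITION & SPEC =====
def Spec_analyze_visitor_utterance_py (utterance : String) (out : String) : Prop := out = analyze_visitor_utterance_py_alt utterance
instance (utterance : String) (out : String) : Decidable (Spec_analyze_visitor_utterance_py utterance out) := by unfold Spec_analyze_visitor_utterance_py; infer_instance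

-- ===== CLAIM =====
def Claim_equal_analyze_visitor_utterance_py : Prop := ∀ (utterance : String), Dom_analyze_visitor_utterance_py utterance → Spec_analyze_visitor_utterance_py utterance (analyze_visitor_utterance_py utterance)

-- ===== LEMMAS AND PROOFS =====

-- min-fold over a constant-index group equals a single guarded min.
theorem pvFoldMinGroup (ul : String) (i : Nat) (ws : List String) (acc : Nat) :
    (ws.map (fun w => (w, i))).foldl
      (fun acc p => if PySem.Str.isIn p.1 ul then min acc p.2 else acc) acc
      = if ws.any (fun w => PySem.Str.isIn w ul) then min acc i else acc := by
  induction ws generalizing acc with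
  | nil => simp
  | cons w ws ih =>
    simp only [List.map, List.foldl]
    by_cases hw : PySem.Str.isIn w ul = true
    · rw [if_pos hw, ih]
      have hc : ((w :: ws).any fun w => PySem.Str.isIn w ul) = true := by
        rw [List.any_cons, hw, Bool.true_or]
      rw [if_pos hc]
      split <;> omega
    · rw [if_neg hw, ih]
      have hc : ((w :: ws).any fun w => PySem.Str.isIn w ul)
          = (ws.any fun w => PySem.Str.isIn w ul) := by
        rw [List.any_cons, eq_false_of_ne_true hw, Bool.false_or]
      rw [hc]

-- Evaluate B's question-side table lookup as A's cascade.
theorem pvQEval (ul : String) :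
    pvQLabels.getD (pvMinMatch ul pvQKeywords (pvQLabels.length - 1)) "" =
      (if ["more", "tell me", "explain", "about"].any (fun w => PySem.Str.isIn w ul) then
        "Asking for more detailed information - wants deeper explanation"
      else if ["meaning", "significance", "important"].any (fun w => PySem.Str.isIn w ul) then
        "Asking about meaning/significance - wants cultural/historical context"
      else if ["made", "created", "built", "constructed"].any (fun w => PySem.Str.isIn w ul) then
        "Asking about creation/construction - wants process/technique information"
      else "Asking a specific question - wants direct answer") := by
  have h : pvQKeywords =
      (["more", "tell me", "explain", "about"].map (fun w => (w, 0)))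
        ++ (["meaning", "significance", "important"].map (fun w => (w, 1)))
        ++ (["made", "created", "built", "constructed"].map (fun w => (w, 2))) := rfl
  rw [pvMinMatch, h, List.foldl_append, List.foldl_append,
    pvFoldMinGroup, pvFoldMinGroup, pvFoldMinGroup]
  split_ifs <;> rfl

-- Evaluate B's statement-side table lookup as A's cascade.
theorem pvSEval (ul : String) :
    pvSLabels.getD (pvMinMatch ul pvSKeywords (pvSLabels.length - 1)) "" =
      (if ["interesting", "fascinating", "amazing", "beautiful", "incredible"].any
          (fun w => PySem.Str.isIn w ul) then
        "Expressing positive interest - engaged and wants to learn more"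
      else if ["confused", "understand", "unclear", "not sure"].any (fun w => PySem.Str.isIn w ul) then
        "Expressing confusion - needs clarification or simpler explanation"
      else if ["yes", "ok", "sure", "i see", "understand"].any (fun w => PySem.Str.isIn w ul) then
        "Acknowledging information - ready for next topic or deeper detail"
      else if ["reminds me", "similar", "like", "seen"].any (fun w => PySem.Str.isIn w ul) then
        "Making personal connections - engage with their experience"
      else "General engagement - continue educational dialogue") := by
  have h : pvSKeywords =
      (["interesting", "fascinating", "amazing", "beautiful", "incredible"].map (fun w => (w, 0)))
        ++ (["confused", "understand", "unclear", "not sure"].map (fun w => (w, 1)))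
        ++ (["yes", "ok", "sure", "i see", "understand"].map (fun w => (w, 2)))
        ++ (["reminds me", "similar", "like", "seen"].map (fun w => (w, 3))) := rfl
  rw [pvMinMatch, h, List.foldl_append, List.foldl_append, List.foldl_append,
    pvFoldMinGroup, pvFoldMinGroup, pvFoldMinGroup, pvFoldMinGroup]
  split_ifs <;> rfl

-- ===== VERDICT =====
theorem analyze_visitor_utterance_py_spec : Claim_equal_analyze_visitor_utterance_py := by
  intro u _
  unfold Spec_analyze_visitor_utterance_py
  simp only [analyze_visitor_utterance_py, analyze_visitor_utterance_py_alt]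
  cases hq : (["what", "how", "why", "when", "where", "who", "which"].any
      (fun w => PySem.Str.isIn w (PySem.Str.lower u)) || PySem.Str.isIn "?" u) with
  | true =>
    have hq' : (PySem.Str.isIn "?" u || ["what", "how", "why", "when", "where", "who", "which"].any
        (fun w => PySem.Str.isIn w (PySem.Str.lower u))) = true := by
      rw [Bool.or_comm]; exact hq
    rw [hq']
    exact (pvQEval (PySem.Str.lower u)).symm
  | false =>
    have hq' : (PySem.Str.isIn "?" u || ["what", "how", "why", "when", "where", "who", "which"].any
        (fun w => PySem.Str.isIn w (PySem.Str.lower u))) = false := by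
      rw [Bool.or_comm]; exact hq
    rw [hq']
    exact (pvSEval (PySem.Str.lower u)).symm
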